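-- pv_equiv track=rewrite | github.com/JoseKadur/Codewars_practice | codewar_task_2.py | solution
-- ===== SOURCE A (Python) =====
-- def solution(s):
--     if len(s) % 2 != 0:
--         s += '_'
--     odd_index = [i for i in range(len(s)) if i % 2 == 0]
--     done = []
--     for i in odd_index:
--         done.append([s[i:i+2]])
--     return done
-- ===== SOURCE B (Python) =====
-- def solution(s):
--     if len(s) % 2 != 0:
--         s += '_'
--     out = []
--     buf = None
--     for c in s:
--         if buf is None:
--             buf = c
--         else:
--             out.append([buf + c])
--             buf = None
--     return out
-- ===== Notes on version B (the rewrite author's own statement) =====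
-- stated objective: alternative
-- what changed: Replaced the even-index list plus per-index slicing with a single pass over the (padded) string that carries a one-character buffer and emits a pair whenever the buffer is full.
import Mathlib
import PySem

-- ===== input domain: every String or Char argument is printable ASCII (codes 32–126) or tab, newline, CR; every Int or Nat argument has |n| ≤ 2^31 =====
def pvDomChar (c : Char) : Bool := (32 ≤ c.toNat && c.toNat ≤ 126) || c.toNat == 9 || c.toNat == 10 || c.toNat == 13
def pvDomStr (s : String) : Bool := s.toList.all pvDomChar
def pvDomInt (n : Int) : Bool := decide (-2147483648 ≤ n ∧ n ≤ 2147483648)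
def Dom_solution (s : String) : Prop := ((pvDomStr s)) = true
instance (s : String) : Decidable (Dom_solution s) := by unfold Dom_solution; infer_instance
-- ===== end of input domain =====

-- B replaces A's even-index list and per-index slicing by a single pass over the padded
-- string carrying a one-character buffer (alternative decomposition, same cost).

-- ===== PORT A =====
-- A: pad with '_' if odd length, collect the even indices, slice s[i:i+2] at each.
def solution (s : String) : List (List String) :=
  let cs := if s.toList.length % 2 ≠ 0 then s.toList ++ ['_'] else s.toList
  let oddIndex := (PySem.List.pyRange 0 (cs.length : Int) 1).filter
    (fun i => PySem.Int.mod i 2 == 0)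
  oddIndex.foldl
    (fun done i => done ++ [[String.ofList (PySem.List.slice cs (some i) (some (i + 2)))]]) []

-- ===== PORT B =====
-- B: pad likewise, then one fold over the characters carrying (output, pending char).
def solution_alt (s : String) : List (List String) :=
  let t := if s.toList.length % 2 ≠ 0 then s.toList ++ ['_'] else s.toList
  (t.foldl
    (fun (st : List (List String) × Option Char) c =>
      match st.2 with
      | none => (st.1, some c)
      | some b => (st.1 ++ [[String.ofList [b, c]]], none))
    ([], none)).1

-- ===== PRECONDITION & SPEC =====
def Spec_solution (s : String) (out : List (List String)) : Prop := out = solution_alt s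
instance (s : String) (out : List (List String)) : Decidable (Spec_solution s out) := by unfold Spec_solution; infer_instance

-- ===== CLAIM (what is proved, stated in full; the proofs are below) =====
def Claim_equal_solution : Prop := ∀ (s : String), Dom_solution s → Spec_solution s (solution s)

-- ===== LEMMAS AND PROOFS =====

-- the common value: the 2-character chunks of an even-length list
def chunk2 : List Char → List (List String)
  | a :: b :: r => [String.ofList [a, b]] :: chunk2 r
  | _ => []

theorem padded_even (cs : List Char) :
    (if cs.length % 2 ≠ 0 then cs ++ ['_'] else cs).length % 2 = 0 := by
  split <;> simp_all <;> try omega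

theorem mod2_cast (k : Nat) : (PySem.Int.mod (k : Int) 2 == 0) = (k % 2 == 0) := by
  have h : PySem.Int.mod (k : Int) 2 = ((k % 2 : Nat) : Int) := by
    simp [PySem.Int.mod, Int.fmod_eq_emod]
  rw [h]
  by_cases hk : k % 2 = 0 <;> simp [hk] <;> try omega

theorem slice_two (t : List Char) (k : Nat) :
    PySem.List.slice t (some (k : Int)) (some ((k : Int) + 2)) = (t.drop k).take 2 := by
  have h := PySem.List.slice_natCast_add t k 2
  simpa using h

theorem foldl_push {α β : Type} (g : α → List β) (l : List α) (acc : List (List β)) :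
    l.foldl (fun d k => d ++ [g k]) acc = acc ++ l.map g := by
  induction l generalizing acc <;> simp [*]

theorem filt_map (t : List Char) (h : t.length % 2 = 0) :
    ((List.range t.length).filter (fun k => k % 2 == 0)).map
      (fun k => [String.ofList ((t.drop k).take 2)]) = chunk2 t := by
  induction t using chunk2.induct with
  | case1 a b r ih =>
    have hr : r.length % 2 = 0 := by simp at h; omega
    simp only [List.length_cons]
    rw [show r.length + 1 + 1 = (r.length + 1) + 1 from rfl,
        List.range_succ_eq_map, List.range_succ_eq_map]
    simp only [List.map_cons, List.map_map, List.filter_cons, List.filter_map]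
    norm_num
    rw [show ((fun k => k % 2 == 0) ∘ (Nat.succ ∘ Nat.succ)) = (fun k : Nat => k % 2 == 0) by
      funext k; simp [Function.comp, Nat.succ_eq_add_one]; omega]
    rw [show ((fun k => [String.ofList (List.take 2 (List.drop k (a :: b :: r)))]) ∘ (Nat.succ ∘ Nat.succ))
        = (fun k : Nat => [String.ofList (List.take 2 (List.drop k r))]) by
      funext k; simp [Function.comp]]
    simp [chunk2, ih hr]
  | case2 t ht =>
    cases t with
    | nil => simp [chunk2]
    | cons a t' =>
      cases t' with
      | nil => simp at h
      | cons b r => exact absurd rfl (fun hh => ht a b r hh)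

theorem solution_eq_chunk2 (s : String) :
    solution s = chunk2 (if s.toList.length % 2 ≠ 0 then s.toList ++ ['_'] else s.toList) := by
  simp only [solution]
  rw [PySem.List.pyRange_zero_nat, List.filter_map, List.foldl_map]
  rw [show ((fun i => PySem.Int.mod i 2 == 0) ∘ fun (k : Nat) => (k : Int))
      = (fun k : Nat => k % 2 == 0) by funext k; exact mod2_cast k]
  rw [show (fun (d : List (List String)) (k : Nat) => d ++
        [[String.ofList (PySem.List.slice (if s.toList.length % 2 ≠ 0 then s.toList ++ ['_'] else s.toList) (some (k : Int)) (some ((k : Int) + 2)))]])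
      = (fun d k => d ++ [[String.ofList (((if s.toList.length % 2 ≠ 0 then s.toList ++ ['_'] else s.toList).drop k).take 2)]]) by
    funext d k; rw [slice_two]]
  rw [foldl_push, filt_map _ (padded_even s.toList)]
  simp

theorem foldlB (t : List Char) (h : t.length % 2 = 0) (acc : List (List String)) :
    t.foldl
      (fun (st : List (List String) × Option Char) c =>
        match st.2 with
        | none => (st.1, some c)
        | some b => (st.1 ++ [[String.ofList [b, c]]], none))
      (acc, none) = (acc ++ chunk2 t, none) := by
  induction t using chunk2.induct generalizing acc with
  | case1 a b r ih =>
    have hr : r.length % 2 = 0 := by simp at h; omega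
    simp only [List.foldl_cons]
    rw [ih hr]
    simp [chunk2]
  | case2 t ht =>
    cases t with
    | nil => simp [chunk2]
    | cons a t' =>
      cases t' with
      | nil => simp at h
      | cons b r => exact absurd rfl (fun hh => ht a b r hh)

theorem solution_alt_eq_chunk2 (s : String) :
    solution_alt s = chunk2 (if s.toList.length % 2 ≠ 0 then s.toList ++ ['_'] else s.toList) := by
  simp only [solution_alt]
  rw [foldlB _ (padded_even s.toList) []]
  simp

-- ===== VERDICT (by name: the statement is the Claim_ definition above) =====
theorem solution_spec : Claim_equal_solution := by
  intro s _
  unfold Spec_solution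
  rw [solution_eq_chunk2, solution_alt_eq_chunk2]
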